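-- pv_equiv track=rewrite | github.com/larrybrager-personal/talking-pet-backend | model_routing.py | _snap_seconds
-- ===== SOURCE A (Python) =====
-- def _snap_seconds(requested_seconds: int, supported_durations: list[int]) -> int:
--     if not supported_durations:
--         return requested_seconds
--     sorted_durations = sorted(set(supported_durations))
--     candidates = [value for value in sorted_durations if value <= requested_seconds]
--     if candidates:
--         return max(candidates)
--     return min(sorted_durations, key=lambda value: abs(value - requested_seconds))
-- ===== SOURCE B (Python) =====
-- def _snap_seconds(requested_seconds: int, supported_durations: list[int]) -> int:
--     best_le = None   # largest supported value <= requested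
--     mn = None        # global minimum of supported values
--     for v in supported_durations:
--         if v <= requested_seconds and (best_le is None or v > best_le):
--             best_le = v
--         if mn is None or v < mn:
--             mn = v
--     if best_le is not None:
--         return best_le
--     if mn is not None:
--         return mn
--     return requested_seconds
-- ===== Notes on version B (the rewrite author's own statement) =====
-- stated objective: faster
-- what changed: replaces sort-dedup-filter-max/min-by-key with a single linear pass tracking the largest value <= requested and the global minimum (when all values exceed the request, the nearest one is simply the minimum)
import Mathlib
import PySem

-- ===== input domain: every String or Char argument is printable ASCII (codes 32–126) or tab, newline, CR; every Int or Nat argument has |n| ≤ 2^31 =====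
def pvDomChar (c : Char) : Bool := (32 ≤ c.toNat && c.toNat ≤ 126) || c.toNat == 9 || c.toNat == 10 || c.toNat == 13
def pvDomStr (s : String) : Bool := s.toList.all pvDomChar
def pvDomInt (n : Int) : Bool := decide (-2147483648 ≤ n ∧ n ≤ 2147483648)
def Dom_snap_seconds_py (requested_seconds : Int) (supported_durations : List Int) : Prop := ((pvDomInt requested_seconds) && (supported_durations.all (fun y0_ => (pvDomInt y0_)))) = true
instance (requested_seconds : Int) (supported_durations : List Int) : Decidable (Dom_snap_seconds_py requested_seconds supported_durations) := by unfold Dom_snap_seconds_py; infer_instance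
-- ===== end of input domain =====

-- B replaces A's sort/dedup/filter/key-min pipeline with one linear pass keeping the
-- largest value ≤ requested and the global minimum (alternative algorithm, same result).

-- ===== PORT A =====
def snap_seconds_py (requested_seconds : Int) (supported_durations : List Int) : Int :=
  if supported_durations = [] then requested_seconds
  else
    let sorted_durations := PySem.List.sorted (PySem.Set.ofList supported_durations) (fun v => v) false
    let candidates := sorted_durations.filter (fun v => decide (v ≤ requested_seconds))
    if candidates ≠ [] then
      match PySem.List.max? candidates (fun v => v) with
      | some m => m
      | none => 0   -- unreachable: candidates ≠ []
    else
      match PySem.List.min? sorted_durations (fun v => |v - requested_seconds|) with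
      | some m => m
      | none => 0   -- unreachable: sorted_durations ≠ []

-- ===== PORT B =====
-- 'if v <= r and (best_le is None or v > best_le): best_le = v'
def snapAltStep1 (r : Int) (ob : Option Int) (v : Int) : Option Int :=
  match ob with
  | none => if v ≤ r then some v else none
  | some b => if v ≤ r ∧ b < v then some v else some b

-- 'if mn is None or v < mn: mn = v'
def snapAltStep2 (om : Option Int) (v : Int) : Option Int :=
  match om with
  | none => some v
  | some m => if v < m then some v else some m

def snap_seconds_py_alt (requested_seconds : Int) (supported_durations : List Int) : Int :=
  let s := supported_durations.foldl
    (fun s v => (snapAltStep1 requested_seconds s.1 v, snapAltStep2 s.2 v)) (none, none)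
  match s.1 with
  | some b => b
  | none =>
    match s.2 with
    | some m => m
    | none => requested_seconds

-- ===== PRECONDITION & SPEC =====
def Spec_snap_seconds_py (requested_seconds : Int) (supported_durations : List Int) (out : Int) : Prop := out = snap_seconds_py_alt requested_seconds supported_durations
instance (requested_seconds : Int) (supported_durations : List Int) (out : Int) : Decidable (Spec_snap_seconds_py requested_seconds supported_durations out) := by unfold Spec_snap_seconds_py; infer_instance

-- ===== CLAIM (what is proved, stated in full; the proofs are below) =====
def Claim_equal_snap_seconds_py : Prop := ∀ (requested_seconds : Int) (supported_durations : List Int), Dom_snap_seconds_py requested_seconds supported_durations → Spec_snap_seconds_py requested_seconds supported_durations (snap_seconds_py requested_seconds supported_durations)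

-- ===== LEMMAS AND PROOFS =====

-- invariant of B's best_le accumulator over the processed prefix l
def OB (r : Int) (l : List Int) (ob : Option Int) : Prop :=
  match ob with
  | none => ∀ v ∈ l, ¬ v ≤ r
  | some b => b ∈ l ∧ b ≤ r ∧ ∀ v ∈ l, v ≤ r → v ≤ b

-- invariant of B's mn accumulator over the processed prefix l
def OM (l : List Int) (om : Option Int) : Prop :=
  match om with
  | none => l = []
  | some m => m ∈ l ∧ ∀ v ∈ l, m ≤ v

theorem OB_step (r : Int) (l : List Int) (ob : Option Int) (v : Int)
    (h : OB r l ob) : OB r (l ++ [v]) (snapAltStep1 r ob v) := by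
  cases ob with
  | none =>
    simp only [OB, snapAltStep1] at *
    split_ifs with hv
    · refine ⟨by simp, hv, ?_⟩
      intro w hw _
      rcases List.mem_append.mp hw with hw | hw
      · exact absurd ‹w ≤ r› (h w hw)
      · simp at hw; omega
    · intro w hw
      rcases List.mem_append.mp hw with hw | hw
      · exact h w hw
      · simp at hw; omega
  | some b =>
    simp only [OB, snapAltStep1] at *
    obtain ⟨hb, hbr, hmax⟩ := h
    split_ifs with hv
    · refine ⟨by simp, hv.1, ?_⟩
      intro w hw hwr
      rcases List.mem_append.mp hw with hw | hw
      · have := hmax w hw hwr; omega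
      · simp at hw; omega
    · refine ⟨List.mem_append_left _ hb, hbr, ?_⟩
      intro w hw hwr
      rcases List.mem_append.mp hw with hw | hw
      · exact hmax w hw hwr
      · simp at hw; omega

theorem OM_step (l : List Int) (om : Option Int) (v : Int)
    (h : OM l om) : OM (l ++ [v]) (snapAltStep2 om v) := by
  cases om with
  | none =>
    simp only [OM, snapAltStep2] at *
    subst h
    exact ⟨by simp, by intro w hw; simp at hw; omega⟩
  | some m =>
    simp only [OM, snapAltStep2] at *
    obtain ⟨hm, hmin⟩ := h
    split_ifs with hv
    · refine ⟨by simp, ?_⟩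
      intro w hw
      rcases List.mem_append.mp hw with hw | hw
      · have := hmin w hw; omega
      · simp at hw; omega
    · refine ⟨List.mem_append_left _ hm, ?_⟩
      intro w hw
      rcases List.mem_append.mp hw with hw | hw
      · exact hmin w hw
      · simp at hw; omega

theorem fold_inv (r : Int) (xs : List Int) :
    ∀ (pre : List Int) (s : Option Int × Option Int),
      OB r pre s.1 → OM pre s.2 →
      OB r (pre ++ xs)
        (xs.foldl (fun s v => (snapAltStep1 r s.1 v, snapAltStep2 s.2 v)) s).1 ∧
      OM (pre ++ xs)
        (xs.foldl (fun s v => (snapAltStep1 r s.1 v, snapAltStep2 s.2 v)) s).2 := by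
  induction xs with
  | nil => intro pre s h1 h2; simpa using ⟨h1, h2⟩
  | cons x t ih =>
    intro pre s h1 h2
    have := ih (pre ++ [x]) (snapAltStep1 r s.1 x, snapAltStep2 s.2 x)
      (OB_step r pre s.1 x h1) (OM_step pre s.2 x h2)
    simpa [List.foldl_cons, List.append_assoc] using this

theorem fold_props (r : Int) (xs : List Int) :
    OB r xs (xs.foldl (fun s v => (snapAltStep1 r s.1 v, snapAltStep2 s.2 v))
      ((none : Option Int), (none : Option Int))).1 ∧
    OM xs (xs.foldl (fun s v => (snapAltStep1 r s.1 v, snapAltStep2 s.2 v))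
      ((none : Option Int), (none : Option Int))).2 := by
  have := fold_inv r xs [] (none, none) (by intro v hv; simp at hv) (by rfl)
  simpa using this

-- membership of A's candidates list
theorem mem_candidates (r : Int) (xs : List Int) (v : Int) :
    v ∈ (PySem.List.sorted (PySem.Set.ofList xs) (fun v => v) false).filter
          (fun v => decide (v ≤ r)) ↔ v ∈ xs ∧ v ≤ r := by
  simp [List.mem_filter, PySem.List.mem_sorted, PySem.Set.mem_ofList]

-- ===== VERDICT (by name: the statement is the Claim_ definition above) =====
theorem snap_seconds_py_spec : Claim_equal_snap_seconds_py := by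
  intro r xs _
  unfold Spec_snap_seconds_py snap_seconds_py snap_seconds_py_alt
  obtain ⟨hOB, hOM⟩ := fold_props r xs
  set s := xs.foldl (fun s v => (snapAltStep1 r s.1 v, snapAltStep2 s.2 v))
    ((none : Option Int), (none : Option Int)) with hs
  cases h1 : s.1 with
  | some b =>
    rw [h1] at hOB
    simp only [h1]
    obtain ⟨hbmem, hbr, hbmax⟩ := hOB
    have hne : xs ≠ [] := by intro h; subst h; simp at hbmem
    simp only [if_neg hne]
    set cands := (PySem.List.sorted (PySem.Set.ofList xs) (fun v => v) false).filter
      (fun v => decide (v ≤ r)) with hc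
    have hbc : b ∈ cands := (mem_candidates r xs b).mpr ⟨hbmem, hbr⟩
    have hcne : cands ≠ [] := by intro h; rw [h] at hbc; simp at hbc
    simp only [if_pos hcne]
    cases hmax : PySem.List.max? cands (fun v => v) with
    | none => exact absurd ((PySem.List.max?_eq_none_iff _ _).mp hmax) hcne
    | some M =>
      have hM := PySem.List.max?_mem hmax
      obtain ⟨hMx, hMr⟩ := (mem_candidates r xs M).mp hM
      have h1' : M ≤ b := hbmax M hMx hMr
      have h2' : b ≤ M := PySem.List.max?_isMax hmax b hbc
      exact le_antisymm h1' h2'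
  | none =>
    rw [h1] at hOB
    cases h2 : s.2 with
    | none =>
      rw [h2] at hOM
      simp only [OM] at hOM
      simp only [h1, h2]
      simp [hOM]
    | some m =>
      rw [h2] at hOM
      simp only [h1, h2]
      obtain ⟨hmmem, hmmin⟩ := hOM
      have hne : xs ≠ [] := by intro h; subst h; simp at hmmem
      simp only [if_neg hne]
      have hall : ∀ v ∈ xs, r < v := by
        intro v hv
        have := hOB v hv
        omega
      have hcnil : (PySem.List.sorted (PySem.Set.ofList xs) (fun v => v) false).filter
          (fun v => decide (v ≤ r)) = [] := by
        rw [List.filter_eq_nil_iff]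
        intro v hv
        simp only [PySem.List.mem_sorted, PySem.Set.mem_ofList] at hv
        have := hall v hv
        simp; omega
      simp only [hcnil, ne_eq, not_true_eq_false, if_false]
      have hmem : m ∈ PySem.List.sorted (PySem.Set.ofList xs) (fun v => v) false := by
        simp [PySem.List.mem_sorted, PySem.Set.mem_ofList, hmmem]
      cases hmin : PySem.List.min? (PySem.List.sorted (PySem.Set.ofList xs) (fun v => v) false)
          (fun v => |v - r|) with
      | none =>
        have := (PySem.List.min?_eq_none_iff _ _).mp hmin
        rw [this] at hmem; simp at hmem
      | some M =>
        have hMmem := PySem.List.min?_mem hmin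
        have hMx : M ∈ xs := by
          simpa [PySem.List.mem_sorted, PySem.Set.mem_ofList] using hMmem
        have hkey : |M - r| ≤ |m - r| := PySem.List.min?_isMin hmin m hmem
        have h1' : r < M := hall M hMx
        have h2' : r < m := hall m hmmem
        have h3' : m ≤ M := hmmin M hMx
        rw [abs_of_pos (by omega), abs_of_pos (by omega)] at hkey
        have hMm : M ≤ m := by omega
        exact le_antisymm hMm h3'
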